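-- pv_equiv track=rewrite | github.com/jayhyun-hwang/jhLeetCode | python-code/programmers/skillCheck/1.py | solution
-- ===== SOURCE A (Python) =====
-- from typing import List
--
-- def solution(n: int, left: int, right: int) -> List[int]:
--     answer = []
--     tempArr = []
--     for i in range(n):
--         rowArr = []
--         for j in range(n):
--             if j < i + 1:
--                 rowArr.append(i + 1)
--             else:
--                 rowArr.append(j + 1)
--         tempArr.append(rowArr)
--     answer = tempArr
--     return answer
-- ===== SOURCE B (Python) =====
-- from typing import List
--
-- def solution(n: int, left: int, right: int) -> List[int]:
--     # Incremental bordering: the n x n matrix of max(i+1, j+1) is the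
--     # (n-1) x (n-1) matrix bordered by a last column and last row of n's.
--     m = []
--     for k in range(1, n + 1):
--         for row in m:
--             row.append(k)
--         m.append([k] * k)
--     return m
-- ===== Notes on version B (the rewrite author's own statement) =====
-- stated objective: alternative
-- what changed: Replaces A's nested loops with per-cell comparison by an incremental bordering construction: start from the empty matrix and, for k = 1..n, append k to every existing row and add a new bottom row [k]*k, exploiting that the n-matrix is the (n-1)-matrix bordered by a row and column of n; no max/branch or per-cell test at all.
import Mathlib
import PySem

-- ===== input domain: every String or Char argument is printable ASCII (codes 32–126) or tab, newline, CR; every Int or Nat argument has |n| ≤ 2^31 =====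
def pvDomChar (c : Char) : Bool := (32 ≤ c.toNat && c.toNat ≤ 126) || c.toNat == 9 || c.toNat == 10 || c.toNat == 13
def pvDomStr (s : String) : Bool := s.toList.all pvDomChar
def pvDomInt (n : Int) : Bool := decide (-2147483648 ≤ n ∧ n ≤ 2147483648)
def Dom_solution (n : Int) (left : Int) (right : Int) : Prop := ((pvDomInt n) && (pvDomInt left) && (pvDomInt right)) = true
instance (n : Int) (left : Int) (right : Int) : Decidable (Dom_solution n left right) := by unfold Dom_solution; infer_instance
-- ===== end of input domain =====

-- B builds the matrix by incremental bordering (for k = 1..n extend every row with k and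
-- append a bottom row of k's) instead of A's nested loops with a per-cell comparison;
-- objective: alternative. left/right are unused by both, as in A.

-- ===== PORT A =====
def solution (n : Int) (left : Int) (right : Int) : List (List Int) :=
  let tempArr := (PySem.List.pyRange 0 n 1).foldl (fun tempArr i =>
    tempArr ++ [(PySem.List.pyRange 0 n 1).foldl (fun rowArr j =>
      rowArr ++ [if j < i + 1 then i + 1 else j + 1]) []]) []
  tempArr

-- ===== PORT B =====
-- '[k] * k' is List.replicate k.toNat k: exact, since k ≥ 1 inside range(1, n+1).
def solution_alt (n : Int) (left : Int) (right : Int) : List (List Int) :=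
  (PySem.List.pyRange 1 (n + 1) 1).foldl
    (fun m k => m.map (fun row => row ++ [k]) ++ [List.replicate k.toNat k]) []

-- ===== PRECONDITION & SPEC =====
def Spec_solution (n : Int) (left : Int) (right : Int) (out : List (List Int)) : Prop := out = solution_alt n left right
instance (n : Int) (left : Int) (right : Int) (out : List (List Int)) : Decidable (Spec_solution n left right out) := by unfold Spec_solution; infer_instance

-- ===== CLAIM (what is proved, stated in full; the proofs are below) =====
def Claim_equal_solution : Prop := ∀ (n : Int) (left : Int) (right : Int), Dom_solution n left right → Spec_solution n left right (solution n left right)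

-- ===== LEMMAS AND PROOFS =====

-- the matrix both programs compute, in A's per-cell form, over Nat size m
def pvArow (m : Nat) (i : Int) : List Int :=
  (List.range m).map (fun j : Nat => if (j : Int) < i + 1 then i + 1 else (j : Int) + 1)

def pvAmat (m : Nat) : List (List Int) :=
  (List.range m).map (fun i : Nat => pvArow m (i : Int))

theorem pv_foldl_push {α β : Type} (f : α → β) (l : List α) (acc : List β) :
    l.foldl (fun a x => a ++ [f x]) acc = acc ++ l.map f := by
  induction l generalizing acc with
  | nil => simp
  | cons x xs ih => simp [List.foldl_cons, ih]

-- A-side: solution computes pvAmat n.toNat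
theorem pv_A_eq (n left right : Int) : solution n left right = pvAmat n.toNat := by
  unfold solution pvAmat pvArow
  rw [pv_foldl_push, List.nil_append, PySem.List.pyRange_one]
  simp only [Int.sub_zero, zero_add, List.map_map, Function.comp_def]
  refine List.map_congr_left (fun i _ => ?_)
  rw [pv_foldl_push, List.nil_append, List.map_map]
  simp only [Function.comp_def]

-- bordering step: the (m+1)-matrix is the m-matrix bordered by a column and row of m+1
theorem pv_border (m : Nat) :
    pvAmat (m + 1)
      = (pvAmat m).map (fun row => row ++ [(m : Int) + 1])
        ++ [List.replicate (m + 1) ((m : Int) + 1)] := by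
  unfold pvAmat
  rw [List.range_succ, List.map_append, List.map_map, List.map_singleton]
  congr 1
  · refine List.map_congr_left (fun i hi => ?_)
    have hi' : i < m := List.mem_range.mp hi
    show pvArow (m + 1) i = pvArow m i ++ [(m : Int) + 1]
    unfold pvArow
    rw [List.range_succ, List.map_append, List.map_singleton]
    congr 2
    have hlt : ¬ ((m : Int) < (i : Int) + 1) := by exact_mod_cast by omega
    simp [hlt]
  · show [pvArow (m + 1) (m : Int)] = [List.replicate (m + 1) ((m : Int) + 1)]
    unfold pvArow
    congr 1
    have hall : ∀ j ∈ List.range (m + 1),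
        (fun j : Nat => if (j : Int) < (m : Int) + 1 then (m : Int) + 1 else (j : Int) + 1) j
          = (m : Int) + 1 := by
      intro j hj
      have hj' : j < m + 1 := List.mem_range.mp hj
      have : (j : Int) < (m : Int) + 1 := by exact_mod_cast hj'
      simp [this]
    rw [List.map_congr_left hall, List.map_const', List.length_range]

-- B-side: the bordering fold over range(1, m+1) builds pvAmat m
theorem pv_B_eq (m : Nat) :
    (PySem.List.pyRange 1 ((m : Int) + 1) 1).foldl
      (fun acc k => acc.map (fun row => row ++ [k]) ++ [List.replicate k.toNat k]) []
    = pvAmat m := by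
  induction m with
  | zero =>
    rw [PySem.List.pyRange_one_eq_nil (by norm_num)]
    simp [pvAmat]
  | succ m ih =>
    have hcast : (((m + 1 : Nat) : Int)) + 1 = ((m : Int) + 1) + 1 := by push_cast; ring
    rw [hcast, PySem.List.pyRange_one_succ_right (by exact_mod_cast by omega),
      List.foldl_append, ih, List.foldl_cons, List.foldl_nil, pv_border]
    have h1 : ((m : Int) + 1).toNat = m + 1 := by omega
    rw [h1]

-- ===== VERDICT (by name: the statement is the Claim_ definition above) =====
theorem solution_spec : Claim_equal_solution := by
  intro n left right _
  show solution n left right = solution_alt n left right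
  rw [pv_A_eq]
  unfold solution_alt
  by_cases hn : 0 ≤ n
  · obtain ⟨m, rfl⟩ := Int.eq_ofNat_of_zero_le hn
    rw [Int.toNat_natCast]
    exact (pv_B_eq m).symm
  · rw [PySem.List.pyRange_one_eq_nil (by omega)]
    have h0 : n.toNat = 0 := by omega
    simp [h0, pvAmat]
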